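-- pv_equiv track=rewrite | github.com/NygilNet/leetcode-problems | dailycodingproblem/problem_198.py | largestSubsetSharesLCD
-- ===== SOURCE A (Python) =====
-- from collections import defaultdict
--
-- def largestSubsetSharesLCD(nums: list[int]) -> list[int]:
--     lcds = defaultdict(list)
--     contains_one = False
--     sort = sorted(nums)
--
--     for num in sort:
--         if num == 1:
--             contains_one = True
--             continue
--
--         found_lcd = False
--         for key in lcds:
--             if num % key == 0 or key % num == 0:
--                 found_lcd = True
--                 lcds[key].append(num)
--                 break
--         if not found_lcd:
--             lcds[num].append(num)
--
--     res = []
--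
--     for key in lcds:
--         if len(res) < len(lcds[key]):
--             res = lcds[key]
--
--     if contains_one:
--         res = [1] + res
--     return res
-- ===== SOURCE B (Python) =====
-- def largestSubsetSharesLCD(nums: list[int]) -> list[int]:
--     # Sieve by rounds: repeatedly take the first remaining element as the round's
--     # pivot and peel off every remaining element divisibility-compatible with it
--     # as one whole group; keep the first longest group seen.
--     rest = sorted(x for x in nums if x != 1)
--     best = []
--     while rest:
--         k = rest[0]
--         group = [x for x in rest if x == k or x % k == 0 or k % x == 0]
--         rest = [x for x in rest if not (x == k or x % k == 0 or k % x == 0)]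
--         if len(best) < len(group):
--             best = group
--     return [1] + best if 1 in nums else best
-- ===== Notes on version B (the rewrite author's own statement) =====
-- stated objective: alternative
-- what changed: B replaces A's element-by-element greedy insertion into a dict of groups (inner scan over existing keys per element) by a round-based sieve: repeatedly take the first remaining element as a pivot, peel off its entire divisibility-compatible group in one filtering round, and track the longest group inline; no dict and no per-element key search.
import Mathlib
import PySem

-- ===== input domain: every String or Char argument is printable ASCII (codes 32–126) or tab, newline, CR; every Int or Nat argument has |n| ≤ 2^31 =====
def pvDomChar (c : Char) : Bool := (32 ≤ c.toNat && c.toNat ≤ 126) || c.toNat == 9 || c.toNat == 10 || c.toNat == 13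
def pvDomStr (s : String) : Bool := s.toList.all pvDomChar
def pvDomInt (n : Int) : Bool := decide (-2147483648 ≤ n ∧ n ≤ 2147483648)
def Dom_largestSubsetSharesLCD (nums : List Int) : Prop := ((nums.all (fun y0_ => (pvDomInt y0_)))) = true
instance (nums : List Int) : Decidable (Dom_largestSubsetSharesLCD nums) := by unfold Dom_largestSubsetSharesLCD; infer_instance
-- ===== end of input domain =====

-- B replaces A's element-by-element greedy insertion into a dict of groups by a round-based
-- sieve (peel the first remaining element's whole divisibility-compatible group per round);
-- objective: alternative algorithm, equal return value.

-- ===== PORT A =====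
-- loop body of A's main 'for num in sort' loop (state: the defaultdict and the contains_one flag)
def stepA (st : PySem.Dict Int (List Int) × Bool) (num : Int) : PySem.Dict Int (List Int) × Bool :=
  if num = 1 then (st.1, true)
  else
    match st.1.keys.find? (fun key => PySem.Int.mod num key == 0 || PySem.Int.mod key num == 0) with
    | some key => (st.1.modify key [] (fun l => l ++ [num]), st.2)
    | none     => (st.1.modify num [] (fun l => l ++ [num]), st.2)

def largestSubsetSharesLCD (nums : List Int) : List Int :=
  let sort := PySem.List.sorted nums (fun x => x) false
  let st := sort.foldl stepA (PySem.Dict.empty, false)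
  let res := st.1.keys.foldl (fun res key =>
    if res.length < (st.1.getD key []).length then st.1.getD key [] else res) []
  if st.2 then 1 :: res else res

-- ===== PORT B =====
-- Source B's while loop: peel the group of the first remaining element, keep the longest group
def sieveLoop (rest best : List Int) : List Int :=
  match rest with
  | [] => best
  | k :: tl =>
    let group := (k :: tl).filter (fun x => x == k || PySem.Int.mod x k == 0 || PySem.Int.mod k x == 0)
    let rest' := (k :: tl).filter (fun x => !(x == k || PySem.Int.mod x k == 0 || PySem.Int.mod k x == 0))
    sieveLoop rest' (if best.length < group.length then group else best)
  termination_by rest.length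
  decreasing_by
    simp only [List.filter_cons, beq_self_eq_true, Bool.true_or, Bool.not_true, List.length_cons]
    exact Nat.lt_succ_of_le (List.length_filter_le _ _)

def largestSubsetSharesLCD_alt (nums : List Int) : List Int :=
  let rest := PySem.List.sorted (nums.filter (fun x => !(x == 1))) (fun x => x) false
  let best := sieveLoop rest []
  if nums.contains 1 then 1 :: best else best

-- ===== PRECONDITION & SPEC =====
-- Pre_ excludes exactly the inputs on which Python A raises ZeroDivisionError: those where 0
-- becomes a dict key (a 0 with no negative element present) and a later non-1 element is then
-- reduced modulo that key 0.
def Pre_largestSubsetSharesLCD (nums : List Int) : Prop :=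
  ¬ ((0 : Int) ∈ nums ∧ (∀ x ∈ nums, 0 ≤ x) ∧ (2 ≤ nums.count 0 ∨ ∃ x ∈ nums, 1 < x))
instance (nums : List Int) : Decidable (Pre_largestSubsetSharesLCD nums) := by
  unfold Pre_largestSubsetSharesLCD; infer_instance

def pvWitness_largestSubsetSharesLCD : List Int := [9, 2, 3, 1, 4, 8, -6]

def Spec_largestSubsetSharesLCD (nums : List Int) (out : List Int) : Prop := out = largestSubsetSharesLCD_alt nums
instance (nums : List Int) (out : List Int) : Decidable (Spec_largestSubsetSharesLCD nums out) := by unfold Spec_largestSubsetSharesLCD; infer_instance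

-- ===== CLAIM (what is proved, stated in full; the proofs are below) =====
def Claim_equal_largestSubsetSharesLCD : Prop := ∀ (nums : List Int), Dom_largestSubsetSharesLCD nums → Pre_largestSubsetSharesLCD nums → Spec_largestSubsetSharesLCD nums (largestSubsetSharesLCD nums)

-- ===== LEMMAS AND PROOFS =====

-- the divisibility-compatibility test shared by both Pythons: num % key == 0 or key % num == 0
def compat (x k : Int) : Bool := PySem.Int.mod x k == 0 || PySem.Int.mod k x == 0

-- first key (in creation order) compatible with x
def firstSharedKey (keys : List Int) (x : Int) : Option Int :=
  keys.find? (fun k => compat x k)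

-- A's greedy pass, re-expressed over a flat state (key list, (key, element) assignment list)
def stepB (st : List Int × List (Int × Int)) (x : Int) : List Int × List (Int × Int) :=
  if x = 1 then st
  else
    match firstSharedKey st.1 x with
    | some k => (st.1, st.2 ++ [(k, x)])
    | none   => (st.1 ++ [x], st.2 ++ [(x, x)])

-- the group of key k recovered from the flat assignment list
def grp (asg : List (Int × Int)) (k : Int) : List Int :=
  (asg.filter (fun p => p.1 == k)).map Prod.snd

-- A's dict reconstructed from the flat state
def mkD (keys : List Int) (asg : List (Int × Int)) : PySem.Dict Int (List Int) :=
  PySem.Dict.mk (keys.map (fun k => (k, grp asg k)))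

-- final key list / assignment list of the greedy pass started with key list ks
def keysF (u ks : List Int) : List Int := (u.foldl stepB (ks, [])).1
def asgF (u ks : List Int) : List (Int × Int) := (u.foldl stepB (ks, [])).2

-- sieve rounds: the successive peeled groups of B's while loop
def rounds (rest : List Int) : List (List Int) :=
  match rest with
  | [] => []
  | k :: tl =>
    ((k :: tl).filter (fun x => compat x k)) :: rounds ((k :: tl).filter (fun x => !compat x k))
  termination_by rest.length
  decreasing_by
    simp only [List.filter_cons]
    have h : compat k k = true := by
      simp [compat, (PySem.Int.mod_eq_zero_iff_dvd k k).mpr dvd_rfl]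
    simp only [h, Bool.not_true, List.length_cons]
    exact Nat.lt_succ_of_le (List.length_filter_le _ _)

theorem keys_mkD (keys : List Int) (asg : List (Int × Int)) :
    (mkD keys asg).keys = keys := by
  simp only [mkD, PySem.Dict.keys, List.map_map]
  exact (List.map_congr_left fun a _ => rfl).trans (List.map_id keys)

theorem getD_mkD (keys : List Int) (asg : List (Int × Int)) (k : Int)
    (hk : k ∈ keys) (hnd : keys.Nodup) :
    (mkD keys asg).getD k [] = grp asg k := by
  apply PySem.Dict.getD_of_mem_items
  · simp [mkD]
    exact hk
  · rw [keys_mkD]; exact hnd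

theorem grp_append (asg : List (Int × Int)) (k x k' : Int) :
    grp (asg ++ [(k, x)]) k' = grp asg k' ++ (if k = k' then [x] else []) := by
  simp [grp, List.filter_append]
  split_ifs with h <;> simp [h]

theorem grp_nil_of_closed (asg : List (Int × Int)) (keys : List Int) (x : Int)
    (hc : ∀ p ∈ asg, p.1 ∈ keys) (hx : x ∉ keys) : grp asg x = [] := by
  simp [grp, List.filter_eq_nil_iff]
  intro a b hab hax
  exact hx (hax ▸ hc (a, b) hab)

theorem mod_self_zero (x : Int) : PySem.Int.mod x x = 0 :=
  (PySem.Int.mod_eq_zero_iff_dvd x x).mpr dvd_rfl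

theorem compat_self (k : Int) : compat k k = true := by
  simp [compat, mod_self_zero]

-- Source B's per-element test equals the shared compatibility test
theorem keep_eq_compat (k x : Int) :
    (x == k || PySem.Int.mod x k == 0 || PySem.Int.mod k x == 0) = compat x k := by
  by_cases h : x = k
  · subst h; simp [compat, mod_self_zero]
  · simp [compat, h, Bool.or_assoc]

-- the loop invariant: A's fold state is the flat greedy state seen through mkD, the flag collects 1s
theorem loop_inv (l : List Int) : ∀ (keys : List Int) (asg : List (Int × Int)) (c : Bool),
    keys.Nodup → (∀ p ∈ asg, p.1 ∈ keys) →
    l.foldl stepA (mkD keys asg, c) =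
      (mkD (l.foldl stepB (keys, asg)).1 (l.foldl stepB (keys, asg)).2, c || l.contains 1)
    ∧ (l.foldl stepB (keys, asg)).1.Nodup
    ∧ (∀ p ∈ (l.foldl stepB (keys, asg)).2, p.1 ∈ (l.foldl stepB (keys, asg)).1) := by
  induction l with
  | nil => intro keys asg c hnd hc; simpa using ⟨hnd, fun a b h => hc (a, b) h⟩
  | cons x l ih =>
    intro keys asg c hnd hc
    by_cases hx1 : x = 1
    · subst hx1
      have sA : stepA (mkD keys asg, c) 1 = (mkD keys asg, true) := by simp [stepA]
      have sB : stepB (keys, asg) 1 = (keys, asg) := by simp [stepB]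
      rw [List.foldl_cons, List.foldl_cons, sA, sB]
      obtain ⟨h1, h2, h3⟩ := ih keys asg true hnd hc
      refine ⟨?_, h2, h3⟩
      rw [h1]
      simp
    · cases hfind : keys.find? (fun k => compat x k) with
      | some k =>
        have hk : k ∈ keys := List.mem_of_find?_eq_some hfind
        have hc' : ∀ p ∈ asg ++ [(k, x)], p.1 ∈ keys := by
          intro p hp
          rcases List.mem_append.mp hp with h | h
          · exact hc p h
          · simp at h; subst h; exact hk
        have hmod : (mkD keys asg).modify k [] (fun l => l ++ [x]) = mkD keys (asg ++ [(k, x)]) := by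
          apply PySem.Dict.ext
          have hcont : (mkD keys asg).contains k = true := by
            rw [PySem.Dict.contains_iff_mem_keys, keys_mkD]; exact hk
          rw [PySem.Dict.modify, PySem.Dict.items_insert_of_contains, getD_mkD keys asg k hk hnd]
          · simp only [mkD, List.map_map]
            apply List.map_congr_left
            intro a _
            by_cases hak : a = k
            · subst hak; simp [grp_append]
            · simp [hak, grp_append, Ne.symm hak]
          · exact hcont
        have sA : stepA (mkD keys asg, c) x = (mkD keys (asg ++ [(k, x)]), c) := by
          simp only [stepA, if_neg hx1, keys_mkD]
          have : (fun key => PySem.Int.mod x key == 0 || PySem.Int.mod key x == 0)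
              = (fun k => compat x k) := rfl
          rw [this, hfind]
          exact congrArg (fun d => (d, c)) hmod
        have sB : stepB (keys, asg) x = (keys, asg ++ [(k, x)]) := by
          simp only [stepB, if_neg hx1, firstSharedKey, hfind]
        rw [List.foldl_cons, List.foldl_cons, sA, sB]
        obtain ⟨h1, h2, h3⟩ := ih keys (asg ++ [(k, x)]) c hnd hc'
        refine ⟨?_, h2, h3⟩
        rw [h1]
        have h1x : (1 : Int) ≠ x := fun h => hx1 h.symm
        simp [h1x]
      | none =>
        have hxk : x ∉ keys := by
          intro hmem
          have := List.find?_eq_none.mp hfind x hmem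
          simp [compat_self] at this
        have hnd' : (keys ++ [x]).Nodup := by
          simp [List.nodup_append, hnd]
          intro a ha hax
          exact hxk (hax ▸ ha)
        have hc' : ∀ p ∈ asg ++ [(x, x)], p.1 ∈ keys ++ [x] := by
          intro p hp
          rcases List.mem_append.mp hp with h | h
          · exact List.mem_append_left _ (hc p h)
          · simp at h; subst h; simp
        have hmod : (mkD keys asg).modify x [] (fun l => l ++ [x]) = mkD (keys ++ [x]) (asg ++ [(x, x)]) := by
          apply PySem.Dict.ext
          have hcont : (mkD keys asg).contains x = false := by
            rw [← Bool.not_eq_true, PySem.Dict.contains_iff_mem_keys, keys_mkD]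
            exact hxk
          rw [PySem.Dict.modify, PySem.Dict.items_insert_of_not_contains, PySem.Dict.getD_of_not_contains]
          · simp only [mkD, List.map_append, List.map_cons, List.map_nil]
            congr 1
            · apply List.map_congr_left
              intro a ha
              have hax : ¬ (x = a) := fun h => hxk (h ▸ ha)
              simp [grp_append, hax]
            · rw [grp_append, grp_nil_of_closed asg keys x hc hxk]
              simp
          · exact hcont
          · exact hcont
        have sA : stepA (mkD keys asg, c) x = (mkD (keys ++ [x]) (asg ++ [(x, x)]), c) := by
          simp only [stepA, if_neg hx1, keys_mkD]
          have : (fun key => PySem.Int.mod x key == 0 || PySem.Int.mod key x == 0)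
              = (fun k => compat x k) := rfl
          rw [this, hfind]
          exact congrArg (fun d => (d, c)) hmod
        have sB : stepB (keys, asg) x = (keys ++ [x], asg ++ [(x, x)]) := by
          simp only [stepB, if_neg hx1, firstSharedKey, hfind]
        rw [List.foldl_cons, List.foldl_cons, sA, sB]
        obtain ⟨h1, h2, h3⟩ := ih (keys ++ [x]) (asg ++ [(x, x)]) c hnd' hc'
        refine ⟨?_, h2, h3⟩
        rw [h1]
        have h1x : (1 : Int) ≠ x := fun h => hx1 h.symm
        simp [h1x]

-- skipping the 1s up front does not change the greedy state
theorem greedy_skip_one (u : List Int) : ∀ st : List Int × List (Int × Int),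
    (u.filter (fun x => !(x == 1))).foldl stepB st = u.foldl stepB st := by
  induction u with
  | nil => intro st; rfl
  | cons x u ih =>
    intro st
    by_cases h : x = 1
    · subst h
      have hst : stepB st 1 = st := by simp [stepB]
      simp only [List.filter_cons, beq_self_eq_true, Bool.not_true,
        List.foldl_cons, hst]
      exact ih st
    · have hb : (!(x == 1)) = true := by simp [h]
      simp only [List.filter_cons, hb, List.foldl_cons]
      exact ih (stepB st x)

-- the greedy fold is linear in the assignment accumulator
theorem greedy_shape (u : List Int) : ∀ (ks : List Int) (a : List (Int × Int)),
    u.foldl stepB (ks, a) = (keysF u ks, a ++ asgF u ks) := by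
  induction u with
  | nil => intro ks a; simp [keysF, asgF]
  | cons x u ih =>
    intro ks a
    by_cases h : x = 1
    · subst h
      have h1 : stepB (ks, a) 1 = (ks, a) := by simp [stepB]
      have h2 : stepB (ks, ([] : List (Int × Int))) 1 = (ks, []) := by simp [stepB]
      simp only [keysF, asgF, List.foldl_cons, h1, h2]
      exact ih ks a
    · cases hf : firstSharedKey ks x with
      | some k =>
        have h1 : stepB (ks, a) x = (ks, a ++ [(k, x)]) := by simp [stepB, h, hf]
        have h2 : stepB (ks, ([] : List (Int × Int))) x = (ks, [(k, x)]) := by simp [stepB, h, hf]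
        simp only [keysF, asgF, List.foldl_cons, h1, h2]
        rw [ih ks (a ++ [(k, x)]), ih ks [(k, x)]]
        simp [keysF, asgF]
      | none =>
        have h1 : stepB (ks, a) x = (ks ++ [x], a ++ [(x, x)]) := by simp [stepB, h, hf]
        have h2 : stepB (ks, ([] : List (Int × Int))) x = (ks ++ [x], [(x, x)]) := by
          simp [stepB, h, hf]
        simp only [keysF, asgF, List.foldl_cons, h1, h2]
        rw [ih (ks ++ [x]) (a ++ [(x, x)]), ih (ks ++ [x]) [(x, x)]]
        simp [keysF, asgF]

theorem grp_cons (c x k : Int) (asg : List (Int × Int)) :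
    grp ((c, x) :: asg) k = (if c = k then [x] else []) ++ grp asg k := by
  by_cases h : c = k <;> simp [grp, h]

-- peeling: the whole compatible-with-k0 group goes to key k0 and the rest is untouched
theorem peel (u : List Int) : ∀ (ks : List Int) (k0 : Int), k0 ∈ ks →
    (∀ x ∈ u, x ≠ 1) →
    (∀ x ∈ u, compat x k0 = true → firstSharedKey ks x = some k0) →
    keysF u ks = keysF (u.filter (fun x => !compat x k0)) ks
    ∧ (∀ c, c ≠ k0 → grp (asgF u ks) c = grp (asgF (u.filter (fun x => !compat x k0)) ks) c)
    ∧ grp (asgF u ks) k0 = u.filter (fun x => compat x k0) := by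
  induction u with
  | nil => intro ks k0 _ _ _; simp [keysF, asgF, grp]
  | cons x u ih =>
    intro ks k0 hk0 hno1 H
    have hx1 : x ≠ 1 := hno1 x (List.mem_cons_self ..)
    have hno1' : ∀ y ∈ u, y ≠ 1 := fun y hy => hno1 y (List.mem_cons_of_mem _ hy)
    have H' : ∀ y ∈ u, compat y k0 = true → firstSharedKey ks y = some k0 :=
      fun y hy => H y (List.mem_cons_of_mem _ hy)
    by_cases hcx : compat x k0 = true
    · -- x joins k0's group and disappears from the peeled list
      have hf : firstSharedKey ks x = some k0 := H x (List.mem_cons_self ..) hcx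
      have h2 : stepB (ks, ([] : List (Int × Int))) x = (ks, [(k0, x)]) := by
        simp [stepB, hx1, hf]
      have hfil : (x :: u).filter (fun x => !compat x k0) = u.filter (fun x => !compat x k0) := by
        simp [hcx]
      obtain ⟨e1, e2, e3⟩ := ih ks k0 hk0 hno1' H'
      refine ⟨?_, ?_, ?_⟩
      · rw [hfil]
        simp only [keysF, List.foldl_cons, h2]
        rw [greedy_shape u ks [(k0, x)]]
        exact e1
      · intro c hc
        rw [hfil]
        have : asgF (x :: u) ks = (k0, x) :: asgF u ks := by
          simp only [asgF, List.foldl_cons, h2]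
          rw [greedy_shape u ks [(k0, x)]]
          rfl
        rw [this, grp_cons, if_neg (fun h => hc h.symm), List.nil_append]
        exact e2 c hc
      · have : asgF (x :: u) ks = (k0, x) :: asgF u ks := by
          simp only [asgF, List.foldl_cons, h2]
          rw [greedy_shape u ks [(k0, x)]]
          rfl
        rw [this, grp_cons, if_pos rfl, List.filter_cons, hcx]
        simp [e3]
    · -- x is untouched by this round
      have hcx' : compat x k0 = false := by simpa using hcx
      have hfil : (x :: u).filter (fun x => !compat x k0)
          = x :: u.filter (fun x => !compat x k0) := by
        simp [List.filter_cons, hcx']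
      have hxk0 : x ≠ k0 := fun h => by rw [h] at hcx; exact hcx (compat_self k0)
      cases hf : firstSharedKey ks x with
      | some c =>
        have hcc : compat x c = true := List.find?_some hf
        have hck0 : c ≠ k0 := fun h => hcx (h ▸ hcc)
        have h2 : stepB (ks, ([] : List (Int × Int))) x = (ks, [(c, x)]) := by
          simp [stepB, hx1, hf]
        have ha1 : asgF (x :: u) ks = (c, x) :: asgF u ks := by
          simp only [asgF, List.foldl_cons, h2]
          rw [greedy_shape u ks [(c, x)]]
          rfl
        have ha2 : asgF (x :: u.filter (fun x => !compat x k0)) ks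
            = (c, x) :: asgF (u.filter (fun x => !compat x k0)) ks := by
          simp only [asgF, List.foldl_cons, h2]
          rw [greedy_shape (u.filter (fun x => !compat x k0)) ks [(c, x)]]
          rfl
        obtain ⟨e1, e2, e3⟩ := ih ks k0 hk0 hno1' H'
        refine ⟨?_, ?_, ?_⟩
        · rw [hfil]
          simp only [keysF, List.foldl_cons, h2]
          rw [greedy_shape u ks [(c, x)], greedy_shape (u.filter (fun x => !compat x k0)) ks [(c, x)]]
          exact e1
        · intro c' hc'
          rw [hfil, ha1, ha2, grp_cons, grp_cons, e2 c' hc']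
        · rw [ha1, grp_cons, if_neg hck0, List.nil_append, e3, List.filter_cons, hcx']
          simp
      | none =>
        have hk0' : k0 ∈ ks ++ [x] := List.mem_append_left _ hk0
        have H'' : ∀ y ∈ u, compat y k0 = true → firstSharedKey (ks ++ [x]) y = some k0 := by
          intro y hy hcy
          have := H' y hy hcy
          simp only [firstSharedKey] at this ⊢
          rw [List.find?_append, this]
          rfl
        have h2 : stepB (ks, ([] : List (Int × Int))) x = (ks ++ [x], [(x, x)]) := by
          simp [stepB, hx1, hf]
        have ha1 : asgF (x :: u) ks = (x, x) :: asgF u (ks ++ [x]) := by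
          simp only [asgF, List.foldl_cons, h2]
          rw [greedy_shape u (ks ++ [x]) [(x, x)]]
          rfl
        have ha2 : asgF (x :: u.filter (fun x => !compat x k0)) ks
            = (x, x) :: asgF (u.filter (fun x => !compat x k0)) (ks ++ [x]) := by
          simp only [asgF, List.foldl_cons, h2]
          rw [greedy_shape (u.filter (fun x => !compat x k0)) (ks ++ [x]) [(x, x)]]
          rfl
        obtain ⟨e1, e2, e3⟩ := ih (ks ++ [x]) k0 hk0' hno1' H''
        refine ⟨?_, ?_, ?_⟩
        · rw [hfil]
          simp only [keysF, List.foldl_cons, h2]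
          rw [greedy_shape u (ks ++ [x]) [(x, x)],
            greedy_shape (u.filter (fun x => !compat x k0)) (ks ++ [x]) [(x, x)]]
          simp only [keysF] at e1
          simp [keysF, e1]
        · intro c' hc'
          rw [hfil, ha1, ha2, grp_cons, grp_cons, e2 c' hc']
        · rw [ha1, grp_cons, if_neg hxk0, List.nil_append, e3, List.filter_cons, hcx']
          simp

-- a key nothing is compatible with is carried along inertly
theorem irrelevant_key (u : List Int) : ∀ (ks' : List Int) (k0 : Int),
    (∀ x ∈ u, compat x k0 = false) →
    keysF u (k0 :: ks') = k0 :: keysF u ks' ∧ asgF u (k0 :: ks') = asgF u ks' := by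
  induction u with
  | nil => intro ks' k0 _; simp [keysF, asgF]
  | cons x u ih =>
    intro ks' k0 hnc
    have hxk0 : compat x k0 = false := hnc x (List.mem_cons_self ..)
    have hnc' : ∀ y ∈ u, compat y k0 = false := fun y hy => hnc y (List.mem_cons_of_mem _ hy)
    by_cases h : x = 1
    · subst h
      have h1 : stepB (k0 :: ks', ([] : List (Int × Int))) 1 = (k0 :: ks', []) := by simp [stepB]
      have h2 : stepB (ks', ([] : List (Int × Int))) 1 = (ks', []) := by simp [stepB]
      simp only [keysF, asgF, List.foldl_cons, h1, h2]
      exact ih ks' k0 hnc'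
    · have hfc : firstSharedKey (k0 :: ks') x = firstSharedKey ks' x := by
        simp [firstSharedKey, hxk0]
      cases hf : firstSharedKey ks' x with
      | some c =>
        have h1 : stepB (k0 :: ks', ([] : List (Int × Int))) x = (k0 :: ks', [(c, x)]) := by
          simp [stepB, h, hfc, hf]
        have h2 : stepB (ks', ([] : List (Int × Int))) x = (ks', [(c, x)]) := by
          simp [stepB, h, hf]
        simp only [keysF, asgF, List.foldl_cons, h1, h2]
        rw [greedy_shape u (k0 :: ks') [(c, x)], greedy_shape u ks' [(c, x)]]
        obtain ⟨e1, e2⟩ := ih ks' k0 hnc'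
        simp only [keysF, asgF] at e1 e2
        simp [keysF, asgF, e1, e2]
      | none =>
        have h1 : stepB (k0 :: ks', ([] : List (Int × Int))) x = (k0 :: (ks' ++ [x]), [(x, x)]) := by
          simp [stepB, h, hfc, hf]
        have h2 : stepB (ks', ([] : List (Int × Int))) x = (ks' ++ [x], [(x, x)]) := by
          simp [stepB, h, hf]
        simp only [keysF, asgF, List.foldl_cons, h1, h2]
        rw [greedy_shape u (k0 :: (ks' ++ [x])) [(x, x)], greedy_shape u (ks' ++ [x]) [(x, x)]]
        obtain ⟨e1, e2⟩ := ih (ks' ++ [x]) k0 hnc'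
        simp only [keysF, asgF] at e1 e2
        simp [keysF, asgF, e1, e2]

-- MAIN: the greedy groups, in key-creation order, are exactly the sieve rounds
theorem greedy_eq_rounds (t : List Int) (h1 : ∀ x ∈ t, x ≠ 1) :
    (keysF t []).map (grp (asgF t [])) = rounds t := by
  induction t using rounds.induct with
  | case1 => simp [keysF, asgF, rounds]
  | case2 k tl ih =>
    have hk1 : k ≠ 1 := h1 k (List.mem_cons_self ..)
    have hno1' : ∀ x ∈ tl, x ≠ 1 := fun x hx => h1 x (List.mem_cons_of_mem _ hx)
    have h2 : stepB (([] : List Int), ([] : List (Int × Int))) k = ([k], [(k, k)]) := by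
      simp [stepB, hk1, firstSharedKey]
    have hK : keysF (k :: tl) [] = keysF tl [k] := by
      simp only [keysF, List.foldl_cons, h2]
      rw [greedy_shape tl [k] [(k, k)]]
      rfl
    have hA : asgF (k :: tl) [] = (k, k) :: asgF tl [k] := by
      simp only [asgF, List.foldl_cons, h2]
      rw [greedy_shape tl [k] [(k, k)]]
      rfl
    have H : ∀ x ∈ tl, compat x k = true → firstSharedKey [k] x = some k := by
      intro x _ hc
      simp [firstSharedKey, hc]
    obtain ⟨p1, p2, p3⟩ := peel tl [k] k (List.mem_singleton.mpr rfl) hno1' H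
    have hnc : ∀ x ∈ tl.filter (fun x => !compat x k), compat x k = false := by
      intro x hx
      simpa using (List.mem_filter.mp hx).2
    obtain ⟨i1, i2⟩ := irrelevant_key (tl.filter (fun x => !compat x k)) [] k hnc
    have hrest : (k :: tl).filter (fun x => !compat x k) = tl.filter (fun x => !compat x k) := by
      simp [compat_self]
    have nd : (keysF (k :: tl) []).Nodup :=
      (loop_inv (k :: tl) [] [] false (by simp) (by simp)).2.1
    rw [hK, p1, i1] at nd
    have hknotin : k ∉ keysF (tl.filter (fun x => !compat x k)) [] := (List.nodup_cons.mp nd).1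
    rw [rounds, hrest, hK, p1, i1, hA, List.map_cons]
    congr 1
    · rw [grp_cons, if_pos rfl, p3, List.filter_cons, compat_self]
      rfl
    · have ih' := ih (by rw [hrest]; exact fun x hx => hno1' x (List.mem_filter.mp hx).1)
      rw [hrest] at ih'
      rw [← ih']
      apply List.map_congr_left
      intro c hc
      have hck : c ≠ k := fun h => hknotin (h ▸ hc)
      rw [grp_cons, if_neg (fun h => hck h.symm), List.nil_append, p2 c hck, i2]

-- B's loop is the fold of the sieve rounds
theorem sieveLoop_eq_foldl (rest : List Int) : ∀ best : List Int,
    sieveLoop rest best =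
      (rounds rest).foldl (fun r g => if r.length < g.length then g else r) best := by
  induction rest using rounds.induct with
  | case1 => intro best; simp [sieveLoop, rounds]
  | case2 k tl ih =>
    intro best
    have hfun : (fun x => x == k || PySem.Int.mod x k == 0 || PySem.Int.mod k x == 0)
        = (fun x => compat x k) := funext (keep_eq_compat k)
    have hfun2 : (fun x => !(x == k || PySem.Int.mod x k == 0 || PySem.Int.mod k x == 0))
        = (fun x => !compat x k) := funext fun x => by rw [keep_eq_compat]
    rw [sieveLoop, rounds]
    simp only [hfun, hfun2, List.foldl_cons]
    exact ih _

-- sorting commutes with filtering out the 1s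
theorem sorted_filter (nums : List Int) :
    (PySem.List.sorted nums (fun x => x) false).filter (fun x => !(x == 1))
      = PySem.List.sorted (nums.filter (fun x => !(x == 1))) (fun x => x) false := by
  refine (PySem.List.sorted_id_eq_of_perm_of_pairwise _ _ ?_ ?_).symm
  · exact (PySem.List.sorted_perm nums (fun x => x) false).filter _
  · exact List.Pairwise.filter _ (PySem.List.sorted_pairwise nums (fun x => x))

-- ===== VERDICT (by name: the statement is the Claim_ definition above) =====
theorem largestSubsetSharesLCD_spec : Claim_equal_largestSubsetSharesLCD := by
  intro nums _ _
  simp only [Spec_largestSubsetSharesLCD, largestSubsetSharesLCD, largestSubsetSharesLCD_alt]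
  obtain ⟨h1, h2, h3⟩ := loop_inv (PySem.List.sorted nums (fun x => x) false) [] [] false
    (by simp) (by simp)
  rw [show (PySem.Dict.empty : PySem.Dict Int (List Int)) = mkD [] [] from rfl, h1]
  simp only [keys_mkD]
  have hfold : ((PySem.List.sorted nums (fun x => x) false).foldl stepB ([], [])).1.foldl
      (fun res key => if res.length < ((mkD ((PySem.List.sorted nums (fun x => x) false).foldl stepB ([], [])).1 ((PySem.List.sorted nums (fun x => x) false).foldl stepB ([], [])).2).getD key []).length
        then (mkD ((PySem.List.sorted nums (fun x => x) false).foldl stepB ([], [])).1 ((PySem.List.sorted nums (fun x => x) false).foldl stepB ([], [])).2).getD key [] else res) []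
    = ((PySem.List.sorted nums (fun x => x) false).foldl stepB ([], [])).1.foldl
      (fun res key => if res.length < (grp ((PySem.List.sorted nums (fun x => x) false).foldl stepB ([], [])).2 key).length
        then grp ((PySem.List.sorted nums (fun x => x) false).foldl stepB ([], [])).2 key else res) [] := by
    apply PySem.List.foldl_congr_mem
    intro acc k hkmem
    rw [getD_mkD _ _ k hkmem h2]
  rw [hfold]
  have hcont : ((PySem.List.sorted nums (fun x => x) false).contains 1) = (nums.contains 1) := by
    by_cases h : (1 : Int) ∈ nums
    · simp [PySem.List.mem_sorted, h]
    · simp [PySem.List.mem_sorted, h]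
  rw [Bool.false_or, hcont]
  have hswitch : (PySem.List.sorted nums (fun x => x) false).foldl stepB ([], [])
      = ((PySem.List.sorted (nums.filter (fun x => !(x == 1))) (fun x => x) false).foldl stepB ([], [])) := by
    rw [← greedy_skip_one (PySem.List.sorted nums (fun x => x) false) ([], []), sorted_filter nums]
  rw [hswitch]
  have ht1 : ∀ x ∈ PySem.List.sorted (nums.filter (fun x => !(x == 1))) (fun x => x) false, x ≠ 1 := by
    intro x hx
    have hxm : x ∈ nums.filter (fun x => !(x == 1)) := by
      rw [PySem.List.mem_sorted] at hx; exact hx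
    simpa using (List.mem_filter.mp hxm).2
  have hval : ((PySem.List.sorted (nums.filter (fun x => !(x == 1))) (fun x => x) false).foldl stepB ([], [])).1.foldl
      (fun res key => if res.length < (grp ((PySem.List.sorted (nums.filter (fun x => !(x == 1))) (fun x => x) false).foldl stepB ([], [])).2 key).length
        then grp ((PySem.List.sorted (nums.filter (fun x => !(x == 1))) (fun x => x) false).foldl stepB ([], [])).2 key else res) []
      = sieveLoop (PySem.List.sorted (nums.filter (fun x => !(x == 1))) (fun x => x) false) [] := by
    rw [sieveLoop_eq_foldl,
      ← greedy_eq_rounds (PySem.List.sorted (nums.filter (fun x => !(x == 1))) (fun x => x) false) ht1,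
      List.foldl_map]
    rfl
  rw [hval]
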